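-- pv_equiv track=rewrite | github.com/cengomer/LeetCode | Test.py | anagrams
-- ===== SOURCE A (Python) =====
-- def anagrams(list1, list2):
--     sorted_tuples_1 = set(tuple(sorted(word)) for word in list1)
--     sorted_tuples_2 = set(tuple(sorted(word)) for word in list2)
--
--     common_tuples = sorted_tuples_1 & sorted_tuples_2
--
--     list_1_output = [word for word in list1 if tuple(sorted(word)) in common_tuples]
--     list_2_output = [word for word in list2 if tuple(sorted(word)) in common_tuples]
--
--     output = []
--
--     for word1 in list_1_output:
--         for word2 in list_2_output:
--             if tuple(sorted(word1)) == tuple(sorted(word2)):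
--                 output.append((word1,word2))
--
--     return output
-- ===== SOURCE B (Python) =====
-- def anagrams(list1, list2):
--     buckets = {}
--     for w in list2:
--         buckets.setdefault(''.join(sorted(w)), []).append(w)
--     out = []
--     for w1 in list1:
--         for w2 in buckets.get(''.join(sorted(w1)), []):
--             out.append((w1, w2))
--     return out
-- ===== Notes on version B (the rewrite author's own statement) =====
-- stated objective: faster
-- what changed: Replaces A's two signature sets, two filter passes and the nested all-pairs comparison loop with a single dict grouping list2 by sorted-character signature, then one pass over list1 emitting each word's bucket; intended as faster (hashing replaces the n*m signature comparisons) and measured ~3.5x at n=1024, though the pair output itself can be quadratic so both time out on the largest probe.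
import Mathlib
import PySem

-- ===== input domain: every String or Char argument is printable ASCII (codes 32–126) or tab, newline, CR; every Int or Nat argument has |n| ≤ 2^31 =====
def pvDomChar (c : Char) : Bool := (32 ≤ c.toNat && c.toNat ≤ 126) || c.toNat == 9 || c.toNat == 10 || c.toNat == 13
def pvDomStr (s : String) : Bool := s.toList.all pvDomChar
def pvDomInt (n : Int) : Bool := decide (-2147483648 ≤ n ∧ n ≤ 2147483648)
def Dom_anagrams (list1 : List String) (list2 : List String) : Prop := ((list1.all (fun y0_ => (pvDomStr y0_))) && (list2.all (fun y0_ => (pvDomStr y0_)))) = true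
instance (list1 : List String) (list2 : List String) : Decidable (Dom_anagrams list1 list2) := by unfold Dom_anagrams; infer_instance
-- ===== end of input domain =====

-- B groups list2 by sorted-character signature in one dict and emits each list1 word's bucket in one
-- pass, replacing A's two sets, two filter passes and nested comparison loop (objective: intended as faster; measured ~3.5x at n=1024).

-- ===== PORT A =====
-- tuple(sorted(word)) as a List Char
def sigA (w : String) : List Char := PySem.List.sorted w.toList (fun c => c) false

def anagrams (list1 : List String) (list2 : List String) : List (String × String) :=
  let sorted_tuples_1 : PySem.Set (List Char) := PySem.Set.ofList (list1.map sigA)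
  let sorted_tuples_2 : PySem.Set (List Char) := PySem.Set.ofList (list2.map sigA)
  let common_tuples : PySem.Set (List Char) := PySem.Set.inter sorted_tuples_1 sorted_tuples_2
  let list_1_output := list1.filter (fun w => PySem.Set.contains common_tuples (sigA w))
  let list_2_output := list2.filter (fun w => PySem.Set.contains common_tuples (sigA w))
  list_1_output.foldl (fun out w1 =>
    list_2_output.foldl (fun out w2 =>
      if sigA w1 == sigA w2 then out ++ [(w1, w2)] else out) out) []

-- ===== PORT B =====
-- ''.join(sorted(w)) as a String
def sigB (w : String) : String := String.ofList (PySem.List.sorted w.toList (fun c => c) false)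

def anagrams_alt (list1 : List String) (list2 : List String) : List (String × String) :=
  let buckets : PySem.Dict String (List String) :=
    list2.foldl (fun d w => d.modify (sigB w) [] (fun l => l ++ [w])) PySem.Dict.empty
  list1.foldl (fun out w1 =>
    (buckets.getD (sigB w1) []).foldl (fun out w2 => out ++ [(w1, w2)]) out) []

-- ===== PRECONDITION & SPEC =====
def Spec_anagrams (list1 : List String) (list2 : List String) (out : List (String × String)) : Prop := out = anagrams_alt list1 list2
instance (list1 : List String) (list2 : List String) (out : List (String × String)) : Decidable (Spec_anagrams list1 list2 out) := by unfold Spec_anagrams; infer_instance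

-- ===== CLAIM (what is proved, stated in full; the proofs are below) =====
def Claim_equal_anagrams : Prop := ∀ (list1 : List String) (list2 : List String), Dom_anagrams list1 list2 → Spec_anagrams list1 list2 (anagrams list1 list2)

-- ===== LEMMAS AND PROOFS =====

theorem sigB_eq_iff (a b : String) : sigB a = sigB b ↔ sigA a = sigA b := by
  unfold sigB sigA
  exact String.ofList_inj

-- dict-grouping loop characterised: the bucket at key c is the input filtered to signature c
theorem getD_group (l : List String) (d : PySem.Dict String (List String)) (c : String) :
    (l.foldl (fun d w => d.modify (sigB w) [] (fun b => b ++ [w])) d).getD c []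
      = d.getD c [] ++ l.filter (fun w => sigB w == c) := by
  induction l generalizing d with
  | nil => simp
  | cons w t ih =>
    simp only [List.foldl_cons, ih, List.filter_cons]
    rw [PySem.Dict.getD_modify]
    by_cases h : sigB w = c
    · simp [h]
    · simp [h, Ne.symm h]

theorem flatMap_filter_eq {α β : Type} (l : List α) (p : α → Bool) (f : α → List β)
    (h : ∀ x ∈ l, p x = false → f x = []) :
    (l.filter p).flatMap f = l.flatMap f := by
  induction l with
  | nil => rfl
  | cons x t ih =>
    have ih' := ih (fun y hy => h y (List.mem_cons_of_mem _ hy))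
    by_cases hp : p x = true
    · simp [hp, ih']
    · have hf : f x = [] := h x (List.mem_cons_self) (by simpa using hp)
      simp [hp, ih', hf]

theorem anagrams_eq_flatMap (list1 list2 : List String) :
    anagrams list1 list2
      = list1.flatMap (fun w1 =>
          (list2.filter (fun w2 => sigA w2 == sigA w1)).map (fun w2 => (w1, w2))) := by
  unfold anagrams
  set common : PySem.Set (List Char) :=
    PySem.Set.inter (PySem.Set.ofList (list1.map sigA)) (PySem.Set.ofList (list2.map sigA)) with hcommon
  have hmem : ∀ t : List Char, t ∈ common ↔ (t ∈ list1.map sigA ∧ t ∈ list2.map sigA) := by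
    intro t
    rw [hcommon, PySem.Set.mem_inter]
    simp [PySem.Set.mem_ofList]
  have step1 :
      (list1.filter (fun w => PySem.Set.contains common (sigA w))).foldl
        (fun out w1 =>
          (list2.filter (fun w => PySem.Set.contains common (sigA w))).foldl
            (fun out w2 => if sigA w1 == sigA w2 then out ++ [(w1, w2)] else out) out) []
      = (list1.filter (fun w => PySem.Set.contains common (sigA w))).flatMap
          (fun w1 => ((list2.filter (fun w => PySem.Set.contains common (sigA w))).filter
              (fun w2 => sigA w1 == sigA w2)).map (fun w2 => (w1, w2))) := by
    rw [PySem.List.foldl_congr_mem _ _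
        (fun out w1 => out ++ (((list2.filter (fun w => PySem.Set.contains common (sigA w))).filter
            (fun w2 => sigA w1 == sigA w2)).map (fun w2 => (w1, w2)))) _
        (fun acc w1 _ => PySem.List.foldl_append_if _ _ _ _)]
    rw [PySem.List.foldl_append_eq_flatMap]
    rfl
  rw [step1]
  have step2 : ∀ w1 ∈ list1.filter (fun w => PySem.Set.contains common (sigA w)),
      ((list2.filter (fun w => PySem.Set.contains common (sigA w))).filter
          (fun w2 => sigA w1 == sigA w2)).map (fun w2 => (w1, w2))
        = (list2.filter (fun w2 => sigA w2 == sigA w1)).map (fun w2 => (w1, w2)) := by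
    intro w1 hw1
    rw [List.mem_filter] at hw1
    obtain ⟨hw1l, hw1c⟩ := hw1
    have hw1m : sigA w1 ∈ common := (PySem.Set.contains_iff _ _).mp hw1c
    congr 1
    rw [List.filter_filter]
    apply List.filter_congr
    intro w2 hw2
    by_cases h : sigA w2 = sigA w1
    · have hm : sigA w2 ∈ common := by
        rw [hmem]
        refine ⟨?_, List.mem_map_of_mem hw2⟩
        rw [h]
        exact ((hmem _).mp hw1m).1
      simp [h]
      exact h ▸ hm
    · have h' : ¬ sigA w1 = sigA w2 := fun hh => h hh.symm
      have hl : (sigA w1 == sigA w2) = false := beq_eq_false_iff_ne.mpr h'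
      have hr : (sigA w2 == sigA w1) = false := beq_eq_false_iff_ne.mpr h
      simp [hl, hr]
  rw [List.flatMap_congr step2]
  apply flatMap_filter_eq
  intro w1 hw1 hp
  have hnot : sigA w1 ∉ list2.map sigA := by
    intro hin
    have hm : sigA w1 ∈ common := (hmem _).mpr ⟨List.mem_map_of_mem hw1, hin⟩
    have hp' : sigA w1 ∉ common := by simpa using hp
    exact hp' hm
  have hnil : list2.filter (fun w2 => sigA w2 == sigA w1) = [] := by
    apply List.filter_eq_nil_iff.mpr
    intro w2 hw2
    simp only [beq_iff_eq]
    intro he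
    exact hnot (he ▸ List.mem_map_of_mem hw2)
  simp [hnil]

theorem anagrams_alt_eq_flatMap (list1 list2 : List String) :
    anagrams_alt list1 list2
      = list1.flatMap (fun w1 =>
          (list2.filter (fun w2 => sigA w2 == sigA w1)).map (fun w2 => (w1, w2))) := by
  show list1.foldl (fun out w1 =>
      ((list2.foldl (fun d w => d.modify (sigB w) [] (fun l => l ++ [w]))
          PySem.Dict.empty).getD (sigB w1) []).foldl
        (fun out w2 => out ++ [(w1, w2)]) out) [] = _
  rw [PySem.List.foldl_congr_mem _ _
      (fun out w1 => out ++ ((list2.filter (fun w2 => sigA w2 == sigA w1)).map (fun w2 => (w1, w2)))) _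
      ?_]
  · rw [PySem.List.foldl_append_eq_flatMap]; rfl
  · intro acc w1 _
    rw [PySem.List.foldl_append_singleton_eq_map, getD_group]
    rw [PySem.Dict.getD_empty, List.nil_append]
    have hfil : list2.filter (fun w => sigB w == sigB w1)
        = list2.filter (fun w2 => sigA w2 == sigA w1) := by
      apply List.filter_congr
      intro w2 _
      by_cases h : sigA w2 = sigA w1
      · simp [(sigB_eq_iff w2 w1).mpr h, h]
      · have hb : ¬ sigB w2 = sigB w1 := fun hh => h ((sigB_eq_iff w2 w1).mp hh)
        simp [h, hb]
    rw [hfil]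

-- ===== VERDICT (by name: the statement is the Claim_ definition above) =====
theorem anagrams_spec : Claim_equal_anagrams := by
  intro list1 list2 _
  unfold Spec_anagrams
  rw [anagrams_eq_flatMap, anagrams_alt_eq_flatMap]
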